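-- pv_equiv track=rewrite | github.com/YuFudan/JDL | evaluate.py | cum
-- ===== SOURCE A (Python) =====
-- from collections import Counter, defaultdict
--
-- def cum(ts):
--     """
--     将一堆事件的发生时间统计为[(t, 累积发生次数)]的形式
--     """
--     num0 = len([t for t in ts if t < 0])
--     t_nums = sorted(list(Counter([t for t in ts if t >= 0]).items()), key=lambda x:x[0])
--     points = [(0, num0)]
--     cnt = num0
--     for t, n in t_nums:
--         points.append((t, cnt))
--         cnt += n
--         points.append((t, cnt))
--     return points
-- ===== SOURCE B (Python) =====
-- def cum(ts):
--     """
--     将一堆事件的发生时间统计为[(t, 累积发生次数)]的形式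
--     """
--     s = sorted(ts)
--     n = len(s)
--     i = 0
--     while i < n and s[i] < 0:
--         i += 1
--     cnt = i
--     points = [(0, cnt)]
--     while i < n:
--         t = s[i]
--         j = i + 1
--         while j < n and s[j] == t:
--             j += 1
--         points.append((t, cnt))
--         cnt += j - i
--         points.append((t, cnt))
--         i = j
--     return points
-- ===== Notes on version B (the rewrite author's own statement) =====
-- stated objective: alternative
-- what changed: Replaces the Counter hash table and the two separate filter passes with a single global sort followed by one left-to-right scan that counts the leading negatives and run-length-groups the non-negative suffix in place.
import Mathlib
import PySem

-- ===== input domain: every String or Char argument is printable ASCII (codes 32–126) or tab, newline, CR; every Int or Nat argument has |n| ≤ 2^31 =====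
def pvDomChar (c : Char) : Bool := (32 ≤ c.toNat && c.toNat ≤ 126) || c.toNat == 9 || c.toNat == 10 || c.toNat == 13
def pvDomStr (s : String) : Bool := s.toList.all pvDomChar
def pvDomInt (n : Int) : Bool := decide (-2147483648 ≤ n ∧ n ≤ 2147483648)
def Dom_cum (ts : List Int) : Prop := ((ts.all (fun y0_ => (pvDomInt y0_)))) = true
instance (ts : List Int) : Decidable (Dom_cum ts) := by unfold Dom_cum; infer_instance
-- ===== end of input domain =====

-- B replaces A's Counter hash table plus two filter passes by one global sort and a single
-- grouping scan; same asymptotic cost, alternative structure.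

-- ===== PORT A =====
def cum (ts : List Int) : List (Int × Int) :=
  let num0 : Int := ((ts.filter (fun t => decide (t < 0))).length : Int)
  let t_nums := PySem.List.sorted
      ((PySem.Dict.counter (ts.filter (fun t => decide (0 ≤ t)))).items) (fun x => x.1) false
  (t_nums.foldl
      (fun (acc : List (Int × Int) × Int) p =>
        (acc.1 ++ [(p.1, acc.2), (p.1, acc.2 + p.2)], acc.2 + p.2))
      ([(0, num0)], num0)).1

-- ===== PORT B =====
-- inner while loop pair of Source B: run-length groups of the (sorted) list, left to right
def cumRle : List Int → List (Int × Int)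
  | [] => []
  | t :: rest =>
      (t, (1 + (rest.takeWhile (fun x => x == t)).length : Int)) ::
        cumRle (rest.dropWhile (fun x => x == t))
termination_by l => l.length
decreasing_by
  simpa using Nat.lt_succ_of_le (List.Sublist.length_le (List.dropWhile_sublist _))

-- the two points appended per group of Source B's outer loop
def cumEmit (cnt : Int) : List (Int × Int) → List (Int × Int)
  | [] => []
  | (t, n) :: rest => (t, cnt) :: (t, cnt + n) :: cumEmit (cnt + n) rest

def cum_alt (ts : List Int) : List (Int × Int) :=
  let s := PySem.List.sorted ts (fun x => x) false
  let num0 : Int := ((s.takeWhile (fun t => decide (t < 0))).length : Int)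
  (0, num0) :: cumEmit num0 (cumRle (s.dropWhile (fun t => decide (t < 0))))

-- ===== PRECONDITION & SPEC =====
def Spec_cum (ts : List Int) (out : List (Int × Int)) : Prop := out = cum_alt ts
instance (ts : List Int) (out : List (Int × Int)) : Decidable (Spec_cum ts out) := by unfold Spec_cum; infer_instance

-- ===== CLAIM (what is proved, stated in full; the proofs are below) =====
def Claim_equal_cum : Prop := ∀ (ts : List Int), Dom_cum ts → Spec_cum ts (cum ts)

-- ===== LEMMAS AND PROOFS =====

-- A's fold over (points, cnt) produces exactly B's emit list after the seed point
theorem cum_foldl_emit (l : List (Int × Int)) (P : List (Int × Int)) (cnt : Int) :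
    (l.foldl
      (fun (acc : List (Int × Int) × Int) p =>
        (acc.1 ++ [(p.1, acc.2), (p.1, acc.2 + p.2)], acc.2 + p.2))
      (P, cnt)).1 = P ++ cumEmit cnt l := by
  induction l generalizing P cnt with
  | nil => simp [cumEmit]
  | cons hd tl ih =>
      obtain ⟨t, n⟩ := hd
      simp [List.foldl_cons, ih, cumEmit]

-- on a ≤-sorted list, takeWhile (<0) is filter (<0) and dropWhile (<0) is filter (0 ≤)
theorem sorted_take_drop_neg (l : List Int) (h : l.Pairwise (· ≤ ·)) :
    l.takeWhile (fun t => decide (t < 0)) = l.filter (fun t => decide (t < 0)) ∧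
    l.dropWhile (fun t => decide (t < 0)) = l.filter (fun t => decide (0 ≤ t)) := by
  induction l with
  | nil => simp
  | cons x xs ih =>
      have hx : ∀ y ∈ xs, x ≤ y := fun y hy => (List.pairwise_cons.mp h).1 y hy
      have htl := ih (List.pairwise_cons.mp h).2
      by_cases hneg : x < 0
      · simp [hneg, not_le.mpr hneg, htl.1, htl.2]
      · rw [not_lt] at hneg
        constructor
        · have h0 : xs.filter (fun t => decide (t < 0)) = [] := by
            apply List.filter_eq_nil_iff.mpr
            intro y hy
            simpa using le_trans hneg (hx y hy)
          simp [not_lt.mpr hneg, h0]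
        · have h1 : xs.filter (fun t => decide (0 ≤ t)) = xs := by
            apply List.filter_eq_self.mpr
            intro y hy
            simpa using le_trans hneg (hx y hy)
          simp [not_lt.mpr hneg, hneg, h1]

-- after dropping the leading run of t's from a ≤-sorted tail, everything is > t
theorem cum_dropRun_gt (t : Int) (l : List Int)
    (hall : ∀ y ∈ l, t ≤ y) (hpw : l.Pairwise (· ≤ ·)) :
    ∀ y ∈ l.dropWhile (fun x => x == t), t < y := by
  induction l with
  | nil => simp
  | cons x xs ih =>
      intro y hy
      by_cases hx : (x == t) = true
      · rw [List.dropWhile_cons, if_pos hx] at hy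
        exact ih (fun z hz => hall z (List.mem_cons_of_mem _ hz))
          (List.pairwise_cons.mp hpw).2 y hy
      · rw [List.dropWhile_cons, if_neg hx] at hy
        have hxt : t < x := by
          have h1 : t ≤ x := hall x List.mem_cons_self
          have h2 : ¬ x = t := by simpa using hx
          omega
        rcases List.mem_cons.mp hy with rfl | hmem
        · exact hxt
        · exact lt_of_lt_of_le hxt ((List.pairwise_cons.mp hpw).1 y hmem)

-- membership/count characterisation of cumRle on a ≤-sorted list
theorem cumRle_mem (l : List Int) (h : l.Pairwise (· ≤ ·)) (a : Int) (n : Int) :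
    ((a, n) ∈ cumRle l ↔ a ∈ l ∧ n = (l.count a : Int)) := by
  induction l using cumRle.induct with
  | case1 => simp [cumRle]
  | case2 t rest ih =>
      have hrest : ∀ y ∈ rest, t ≤ y := fun y hy => (List.pairwise_cons.mp h).1 y hy
      have hpw : rest.Pairwise (· ≤ ·) := (List.pairwise_cons.mp h).2
      have hsplit : rest.takeWhile (fun x => x == t) ++ rest.dropWhile (fun x => x == t)
          = rest := List.takeWhile_append_dropWhile
      have hrunall : ∀ y ∈ rest.takeWhile (fun x => x == t), y = t := fun y hy => by
        simpa using List.mem_takeWhile_imp hy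
      have hgt : ∀ y ∈ rest.dropWhile (fun x => x == t), t < y :=
        cum_dropRun_gt t rest hrest hpw
      have htnot : t ∉ rest.dropWhile (fun x => x == t) :=
        fun hmem => lt_irrefl t (hgt t hmem)
      have hcount : (t :: rest).count t
          = 1 + (rest.takeWhile (fun x => x == t)).length := by
        have h1 : rest.count t = (rest.takeWhile (fun x => x == t)).length := by
          conv_lhs => rw [← hsplit]
          rw [List.count_append]
          have hz : (rest.dropWhile (fun x => x == t)).count t = 0 :=
            List.count_eq_zero.mpr htnot
          have h2 : (rest.takeWhile (fun x => x == t)).count t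
              = (rest.takeWhile (fun x => x == t)).length :=
            List.count_eq_length.mpr (fun y hy => (hrunall y hy).symm)
          omega
        simp [List.count_cons_self, h1]
        omega
      have hcountne : ∀ b : Int, b ≠ t →
          (t :: rest).count b = (rest.dropWhile (fun x => x == t)).count b := by
        intro b hne
        rw [List.count_cons_of_ne (Ne.symm hne)]
        conv_lhs => rw [← hsplit]
        rw [List.count_append]
        have hz : (rest.takeWhile (fun x => x == t)).count b = 0 :=
          List.count_eq_zero.mpr (fun hr => hne (hrunall b hr))
        omega
      have hpw' : (rest.dropWhile (fun x => x == t)).Pairwise (· ≤ ·) :=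
        hpw.sublist (List.dropWhile_sublist _)
      have ih' := ih hpw'
      rw [cumRle]
      rw [List.mem_cons, Prod.mk.injEq, ih']
      constructor
      · rintro (⟨rfl, rfl⟩ | ⟨hmem, rfl⟩)
        · refine ⟨List.mem_cons_self, ?_⟩
          rw [hcount]; push_cast; ring
        · have hne : a ≠ t := fun he => htnot (he ▸ hmem)
          refine ⟨List.mem_cons_of_mem _ ((List.dropWhile_sublist _).mem hmem), ?_⟩
          rw [hcountne a hne]
      · rintro ⟨hmem, rfl⟩
        by_cases heq : a = t
        · subst heq
          left
          refine ⟨rfl, ?_⟩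
          rw [hcount]; push_cast; ring
        · right
          have hmem' : a ∈ rest.dropWhile (fun x => x == t) := by
            rcases List.mem_cons.mp hmem with h1 | h1
            · exact absurd h1 heq
            · rw [← hsplit] at h1
              rcases List.mem_append.mp h1 with h2 | h2
              · exact absurd (hrunall a h2) heq
              · exact h2
          exact ⟨hmem', by rw [hcountne a heq]⟩

-- first components of cumRle of a ≤-sorted list are strictly increasing
theorem cumRle_fst_lt (l : List Int) (h : l.Pairwise (· ≤ ·)) :
    (cumRle l).Pairwise (fun x y => x.1 < y.1) := by
  induction l using cumRle.induct with
  | case1 => simp [cumRle]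
  | case2 t rest ih =>
      have hrest : ∀ y ∈ rest, t ≤ y := fun y hy => (List.pairwise_cons.mp h).1 y hy
      have hpw : rest.Pairwise (· ≤ ·) := (List.pairwise_cons.mp h).2
      have hpw' : (rest.dropWhile (fun x => x == t)).Pairwise (· ≤ ·) :=
        hpw.sublist (List.dropWhile_sublist _)
      have hgt : ∀ y ∈ rest.dropWhile (fun x => x == t), t < y :=
        cum_dropRun_gt t rest hrest hpw
      rw [cumRle]
      refine List.pairwise_cons.mpr ⟨?_, ih hpw'⟩
      intro p hp
      have hmem := (cumRle_mem _ hpw' p.1 p.2).mp (by simpa using hp)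
      exact hgt p.1 hmem.1

-- ===== VERDICT (by name: the statement is the Claim_ definition above) =====
theorem cum_spec : Claim_equal_cum := by
  intro ts _
  unfold Spec_cum cum cum_alt
  have hsp : (PySem.List.sorted ts (fun x => x) false).Pairwise (· ≤ ·) := by
    simpa using PySem.List.sorted_pairwise ts (fun x => x) (κ := Int)
  have hperm : (PySem.List.sorted ts (fun x => x) false).Perm ts :=
    PySem.List.sorted_perm ts (fun x => x) false
  obtain ⟨htw, hdw⟩ := sorted_take_drop_neg _ hsp
  have hnum0 : ((ts.filter (fun t => decide (t < 0))).length : Int)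
      = (((PySem.List.sorted ts (fun x => x) false).takeWhile
          (fun t => decide (t < 0))).length : Int) := by
    rw [htw, (hperm.filter _).length_eq]
  have hrestpw : ((PySem.List.sorted ts (fun x => x) false).dropWhile
      (fun t => decide (t < 0))).Pairwise (· ≤ ·) :=
    hsp.sublist (List.dropWhile_sublist _)
  have hrperm : ((PySem.List.sorted ts (fun x => x) false).dropWhile
      (fun t => decide (t < 0))).Perm (ts.filter (fun t => decide (0 ≤ t))) := by
    rw [hdw]; exact hperm.filter _
  have hsorted : PySem.List.sorted
      ((PySem.Dict.counter (ts.filter (fun t => decide (0 ≤ t)))).items) (fun x => x.1) false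
      = cumRle ((PySem.List.sorted ts (fun x => x) false).dropWhile
          (fun t => decide (t < 0))) := by
    refine PySem.List.sorted_eq_of_perm_of_pairwise_lt _ _ _ ?_ (cumRle_fst_lt _ hrestpw)
    rw [PySem.Dict.items_counter]
    have hnodupL : (cumRle ((PySem.List.sorted ts (fun x => x) false).dropWhile
        (fun t => decide (t < 0)))).Nodup :=
      (cumRle_fst_lt _ hrestpw).imp (fun hxy he => by rw [he] at hxy; exact lt_irrefl _ hxy)
    have hnodupR : ((PySem.Set.ofList (ts.filter (fun t => decide (0 ≤ t)))).map
        (fun k => (k, ((ts.filter (fun t => decide (0 ≤ t))).count k : Int)))).Nodup :=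
      (PySem.Set.nodup_ofList _).map (fun a b hab => (Prod.mk.injEq .. |>.mp hab).1)
    refine (List.perm_ext_iff_of_nodup hnodupL hnodupR).mpr ?_
    rintro ⟨a, n⟩
    rw [cumRle_mem _ hrestpw a n]
    simp only [List.mem_map, PySem.Set.mem_ofList]
    constructor
    · rintro ⟨hmem, rfl⟩
      exact ⟨a, hrperm.mem_iff.mp hmem, by rw [hrperm.count_eq]⟩
    · rintro ⟨k, hk, he⟩
      obtain ⟨rfl, rfl⟩ := Prod.mk.injEq .. |>.mp he
      exact ⟨hrperm.mem_iff.mpr hk, by rw [hrperm.count_eq]⟩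
  rw [hsorted, hnum0, cum_foldl_emit]
  simp
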